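-- pv_equiv track=rewrite | github.com/BryanWhitehurst/advent-of-code-2021 | day17_q1.py | findMaxHeight
-- ===== SOURCE A (Python) =====
-- def findMaxHeight(v):
--     x = 0
--     y = 0
--     vx = v[0]
--     vy = v[1]
--     prev_y = y
--     while(1):
--         x += vx
--         y += vy
--         if y <= prev_y: return prev_y
--         prev_y = y
--         if vx > 0: vx -= 1
--         elif vx < 0: vx += 1
--         vy -= 1
-- ===== SOURCE B (Python) =====
-- def findMaxHeight(v):
--     vy = v[1]
--     return vy * (vy + 1) // 2 if vy > 0 else 0
-- ===== Notes on version B (the rewrite author's own statement) =====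
-- stated objective: faster
-- what changed: Replaces the step-by-step trajectory simulation loop with the closed-form triangular-number formula vy*(vy+1)//2 for positive vy (0 otherwise).
import Mathlib
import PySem

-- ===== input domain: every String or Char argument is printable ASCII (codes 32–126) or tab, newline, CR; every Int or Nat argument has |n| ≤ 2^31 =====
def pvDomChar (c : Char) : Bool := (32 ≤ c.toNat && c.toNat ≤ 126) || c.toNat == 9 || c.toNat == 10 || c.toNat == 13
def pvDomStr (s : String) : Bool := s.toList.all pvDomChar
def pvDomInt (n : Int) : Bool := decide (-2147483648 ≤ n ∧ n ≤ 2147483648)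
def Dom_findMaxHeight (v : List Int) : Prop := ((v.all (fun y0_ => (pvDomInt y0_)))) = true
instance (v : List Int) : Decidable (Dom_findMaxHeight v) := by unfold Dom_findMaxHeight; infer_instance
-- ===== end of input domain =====

-- B replaces A's step-by-step trajectory simulation loop with the closed-form triangular number vy*(vy+1)//2 (0 for vy ≤ 0); equivalence proved for lists of length ≥ 2 (A raises IndexError otherwise).

-- ===== PORT A =====
-- A's while(1) loop over state (x, y, vx, vy, prev_y); the fuel argument only makes the
-- recursion structural: vy + 1 steps always suffice (y stops increasing once vy ≤ 0),
-- so the fuel never runs out on the calls findMaxHeight makes.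
def findMaxHeightLoop (fuel : Nat) (x y vx vy prev_y : Int) : Int :=
  match fuel with
  | 0 => prev_y
  | n + 1 =>
    let x' := x + vx
    let y' := y + vy
    if y' ≤ prev_y then prev_y
    else
      findMaxHeightLoop n x' y'
        (if vx > 0 then vx - 1 else if vx < 0 then vx + 1 else vx)
        (vy - 1) y'

def findMaxHeight (v : List Int) : Int :=
  findMaxHeightLoop ((PySem.List.pyGetD v 1 0).toNat + 1) 0 0
    (PySem.List.pyGetD v 0 0) (PySem.List.pyGetD v 1 0) 0

-- ===== PORT B =====
def findMaxHeight_alt (v : List Int) : Int :=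
  let vy := PySem.List.pyGetD v 1 0
  if vy > 0 then PySem.Int.floordiv (vy * (vy + 1)) 2 else 0

-- ===== PRECONDITION & SPEC =====
-- Pre_ excludes exactly the lists of length < 2, on which A raises IndexError (v[1]).
def Pre_findMaxHeight (v : List Int) : Prop := 2 ≤ v.length
instance (v : List Int) : Decidable (Pre_findMaxHeight v) := by unfold Pre_findMaxHeight; infer_instance
def pvWitness_findMaxHeight : List Int := [6, 9]

def Spec_findMaxHeight (v : List Int) (out : Int) : Prop := out = findMaxHeight_alt v
instance (v : List Int) (out : Int) : Decidable (Spec_findMaxHeight v out) := by unfold Spec_findMaxHeight; infer_instance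

-- ===== CLAIM (what is proved, stated in full; the proofs are below) =====
def Claim_equal_findMaxHeight : Prop := ∀ (v : List Int), Dom_findMaxHeight v → Pre_findMaxHeight v → Spec_findMaxHeight v (findMaxHeight v)

-- ===== LEMMAS AND PROOFS =====
-- Started at any state with prev_y = y and enough fuel, the loop returns y plus the
-- triangular number of vy (or y itself when vy ≤ 0).
theorem findMaxHeightLoop_eq (n : Nat) (vy : Int) (hn : vy.toNat + 1 = n) (x y vx : Int) :
    findMaxHeightLoop n x y vx vy y =
      if vy > 0 then y + PySem.Int.floordiv (vy * (vy + 1)) 2 else y := by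
  induction n generalizing vy x y vx with
  | zero => omega
  | succ k ih =>
    rw [findMaxHeightLoop]
    by_cases hvy : 0 < vy
    · simp only [if_neg (by omega : ¬ y + vy ≤ y)]
      rw [ih (vy - 1) (by omega)]
      rw [if_pos hvy]
      by_cases h1 : vy - 1 > 0
      · rw [if_pos h1]
        have h2 : vy * (vy + 1) = (vy - 1) * vy + 2 * vy := by ring
        rw [h2]
        rw [PySem.Int.floordiv_eq_ediv_of_pos (by norm_num),
            PySem.Int.floordiv_eq_ediv_of_pos (by norm_num)]
        rw [mul_comm 2 vy, Int.add_mul_ediv_right _ _ (by norm_num : (2:Int) ≠ 0)]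
        ring
      · rw [if_neg h1]
        have : vy = 1 := by omega
        subst this
        norm_num [PySem.Int.floordiv]
    · simp only [if_pos (by omega : y + vy ≤ y), if_neg hvy]

-- ===== VERDICT (by name: the statement is the Claim_ definition above) =====
theorem findMaxHeight_spec : Claim_equal_findMaxHeight := by
  intro v _ _
  unfold Spec_findMaxHeight findMaxHeight findMaxHeight_alt
  rw [findMaxHeightLoop_eq ((PySem.List.pyGetD v 1 0).toNat + 1) _ rfl]
  simp
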